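-- pv_equiv track=rewrite | github.com/OferRotemm/python_lab | col.py | lists2dict2
-- ===== SOURCE A (Python) =====
-- def lists2dict2(keys, values) :
--     if len(keys) > len(values):
--       x = len(values)
--     else:
--       x = len(keys)
--     dic = {}
--     for li in range (x):
--         if keys[li] in dic :
--             return None
--         else:
--             dic[keys[li]] = values[li]
--
--     return dic
-- ===== SOURCE B (Python) =====
-- def lists2dict2(keys, values):
--     x = min(len(keys), len(values))
--     if len(set(keys[:x])) < x:
--         return None
--     return dict(zip(keys, values))
-- ===== Notes on version B (the rewrite author's own statement) =====
-- stated objective: idiomatic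
-- what changed: Replaces A's incremental dict-building loop with early return by a two-pass table-first construction: a set-cardinality check on keys[:x] detects duplicates, then dict(zip(keys, values)) builds the whole result at once.
import Mathlib
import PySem

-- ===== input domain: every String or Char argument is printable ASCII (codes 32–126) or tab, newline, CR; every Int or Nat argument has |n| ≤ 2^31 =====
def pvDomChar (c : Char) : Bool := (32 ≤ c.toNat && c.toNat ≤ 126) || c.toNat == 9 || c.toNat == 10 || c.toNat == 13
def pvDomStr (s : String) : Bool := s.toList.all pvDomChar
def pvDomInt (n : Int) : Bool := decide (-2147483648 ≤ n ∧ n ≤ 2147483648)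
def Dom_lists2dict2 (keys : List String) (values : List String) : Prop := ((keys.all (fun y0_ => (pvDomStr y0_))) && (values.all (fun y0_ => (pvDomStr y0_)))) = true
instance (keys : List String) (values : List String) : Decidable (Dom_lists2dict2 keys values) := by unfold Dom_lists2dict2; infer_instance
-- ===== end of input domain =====

-- B replaces A's incremental dict-building loop (early return on duplicate) by an
-- idiomatic two-pass construction: set-cardinality duplicate check, then dict(zip(...)).

-- ===== PORT A =====
-- the 'for li in range(x)' loop of A; keys[li]/values[li] are always in range (li < x ≤ both
-- lengths), so pyGetD is exact here
def lists2dict2Loop (keys : List String) (values : List String) :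
    List Int → PySem.Dict String String → Option (List (String × String))
  | [], dic => some dic.items
  | li :: rest, dic =>
      if dic.contains (PySem.List.pyGetD keys li "") then none
      else lists2dict2Loop keys values rest (dic.insert (PySem.List.pyGetD keys li "") (PySem.List.pyGetD values li ""))

def lists2dict2 (keys : List String) (values : List String) : Option (List (String × String)) :=
  let x : Int := if (keys.length : Int) > (values.length : Int) then (values.length : Int) else (keys.length : Int)
  lists2dict2Loop keys values (PySem.List.pyRange 0 x 1) PySem.Dict.empty

-- ===== PORT B =====
def lists2dict2_alt (keys : List String) (values : List String) : Option (List (String × String)) :=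
  let x := min keys.length values.length
  if (PySem.Set.ofList (keys.take x)).length < x then none
  else some (PySem.Dict.ofList (keys.zip values)).items

-- ===== PRECONDITION & SPEC =====
def Spec_lists2dict2 (keys : List String) (values : List String) (out : Option (List (String × String))) : Prop := out = lists2dict2_alt keys values
instance (keys : List String) (values : List String) (out : Option (List (String × String))) : Decidable (Spec_lists2dict2 keys values out) := by unfold Spec_lists2dict2; infer_instance

-- ===== CLAIM (what is proved, stated in full; the proofs are below) =====
def Claim_equal_lists2dict2 : Prop := ∀ (keys : List String) (values : List String), Dom_lists2dict2 keys values → Spec_lists2dict2 keys values (lists2dict2 keys values)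

-- ===== LEMMAS AND PROOFS =====

-- structural version of A's loop: the pending (key, value) pairs, consumed left to right
def pvPairLoop : List (String × String) → PySem.Dict String String → Option (List (String × String))
  | [], d => some d.items
  | (k, v) :: ps, d => if d.contains k then none else pvPairLoop ps (d.insert k v)

lemma pyRange_nil_of_le (a b : Int) (h : b ≤ a) : PySem.List.pyRange a b 1 = [] := by
  have := PySem.List.length_pyRange_one a b
  have h0 : (b - a).toNat = 0 := by omega
  exact List.eq_nil_of_length_eq_zero (by rw [this, h0])

lemma loop_eq_pairLoop (keys values : List String) (x : Nat)
    (hk : x ≤ keys.length) (hv : x ≤ values.length) :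
    ∀ (i : Nat) (d : PySem.Dict String String), i ≤ x →
    lists2dict2Loop keys values (PySem.List.pyRange (i : Int) (x : Int) 1) d
      = pvPairLoop (((keys.drop i).zip (values.drop i)).take (x - i)) d := by
  intro i d hi
  induction hfuel : x - i generalizing i d with
  | zero =>
      have hix : x ≤ i := by omega
      rw [pyRange_nil_of_le _ _ (by exact_mod_cast hix)]
      simp [lists2dict2Loop, pvPairLoop]
  | succ n ih =>
      have hix : i < x := by omega
      rw [PySem.List.pyRange_one_cons (by exact_mod_cast hix)]
      have hkl : i < keys.length := by omega
      have hvl : i < values.length := by omega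
      have hdk : (keys.drop i) = keys[i] :: keys.drop (i + 1) := by
        rw [List.drop_eq_getElem_cons hkl]
      have hdv : (values.drop i) = values[i] :: values.drop (i + 1) := by
        rw [List.drop_eq_getElem_cons hvl]
      have hgk : PySem.List.pyGetD keys (i : Int) "" = keys[i] := by
        rw [PySem.List.pyGetD_natCast, List.getD_eq_getElem _ _ hkl]
      have hgv : PySem.List.pyGetD values (i : Int) "" = values[i] := by
        rw [PySem.List.pyGetD_natCast, List.getD_eq_getElem _ _ hvl]
      rw [hdk, hdv]
      simp only [lists2dict2Loop, pvPairLoop, List.zip_cons_cons, List.take_succ_cons, hgk, hgv]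
      by_cases hc : d.contains keys[i]
      · simp [hc]
      · simp only [hc, if_false, Bool.false_eq_true]
        have : ((i : Int) + 1) = ((i + 1 : Nat) : Int) := by push_cast; ring
        rw [this, ih (i + 1) _ (by omega) (by omega)]

lemma pairLoop_characterization (ps : List (String × String)) :
    ∀ (d : PySem.Dict String String), d.keys.Nodup →
    pvPairLoop ps d =
      if (ps.map Prod.fst).Nodup ∧ ∀ k ∈ ps.map Prod.fst, d.contains k = false
      then some (d.items ++ ps) else none := by
  induction ps with
  | nil => intro d _; simp [pvPairLoop]
  | cons p ps ih =>
      intro d hnd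
      obtain ⟨k, v⟩ := p
      simp only [pvPairLoop]
      by_cases hc : d.contains k
      · rw [if_pos hc, if_neg]
        rintro ⟨-, hall⟩
        have := hall k (by simp)
        simp [hc] at this
      · rw [if_neg (by simp [hc]), ih _ (PySem.Dict.nodup_keys_insert d k v hnd)]
        have hcond : ((ps.map Prod.fst).Nodup ∧ ∀ k' ∈ ps.map Prod.fst, (d.insert k v).contains k' = false)
            ↔ (((k, v) :: ps).map Prod.fst).Nodup ∧ ∀ k' ∈ ((k, v) :: ps).map Prod.fst, d.contains k' = false := by
          simp only [List.map_cons, List.nodup_cons, List.mem_cons, PySem.Dict.contains_insert]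
          constructor
          · rintro ⟨hnodup, hall⟩
            refine ⟨⟨fun hmem => ?_, hnodup⟩, ?_⟩
            · have := hall k hmem; simp at this
            · rintro k' (rfl | hk')
              · simpa using hc
              · have := hall k' hk'; simp at this; exact this.2
          · rintro ⟨⟨hknot, hnodup⟩, hall⟩
            refine ⟨hnodup, fun k' hk' => ?_⟩
            simp only [Bool.or_eq_false_iff, beq_eq_false_iff_ne]
            exact ⟨fun h => hknot (h ▸ hk'), hall k' (Or.inr hk')⟩
        rw [if_congr hcond rfl rfl]
        by_cases hcase : (((k, v) :: ps).map Prod.fst).Nodup ∧ ∀ k' ∈ ((k, v) :: ps).map Prod.fst, d.contains k' = false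
        · rw [if_pos hcase, if_pos hcase,
            PySem.Dict.items_insert_of_not_contains d v (Bool.eq_false_iff.mpr hc)]
          simp
        · rw [if_neg hcase, if_neg hcase]

lemma setOfList_length_eq_card (l : List String) :
    (PySem.Set.ofList l).length = l.toFinset.card := by
  rw [← List.toFinset_card_of_nodup (PySem.Set.nodup_ofList l)]
  congr 1
  ext x
  simp [PySem.Set.mem_ofList]

lemma toFinset_card_lt_of_not_nodup (l : List String) (h : ¬ l.Nodup) :
    l.toFinset.card < l.length := by
  induction l with
  | nil => exact absurd List.nodup_nil h
  | cons a t ih =>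
      by_cases ha : a ∈ t
      · have : (a :: t).toFinset = t.toFinset := by simp [List.toFinset_cons, ha]
        rw [this]
        calc t.toFinset.card ≤ t.length := List.toFinset_card_le t
          _ < (a :: t).length := by simp
      · have hnt : ¬ t.Nodup := fun hn => h (List.nodup_cons.mpr ⟨ha, hn⟩)
        have := ih hnt
        calc (a :: t).toFinset.card ≤ t.toFinset.card + 1 := by
              simp [List.toFinset_cons]; exact Finset.card_insert_le _ _
          _ < t.length + 1 := by omega
          _ = (a :: t).length := by simp

lemma set_check_iff (l : List String) :
    (PySem.Set.ofList l).length < l.length ↔ ¬ l.Nodup := by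
  constructor
  · intro hlt hnd
    rw [PySem.Set.ofList_eq_self_of_nodup l hnd] at hlt
    omega
  · intro hnd
    rw [setOfList_length_eq_card]
    exact toFinset_card_lt_of_not_nodup l hnd

lemma dict_ofList_items_of_nodup (ps : List (String × String))
    (h : (ps.map Prod.fst).Nodup) : (PySem.Dict.ofList ps).items = ps := by
  have hdef : (PySem.Dict.ofList ps) = ps.foldl (fun d p => d.insert p.1 p.2) PySem.Dict.empty := rfl
  rw [hdef, PySem.Dict.items_foldl_insert_fresh ps Prod.fst Prod.snd PySem.Dict.empty
    (fun a _ => by simp [PySem.Dict.contains_empty]) h]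
  simp [show (PySem.Dict.empty : PySem.Dict String String).items = [] from rfl]

-- ===== VERDICT (by name: the statement is the Claim_ definition above) =====
theorem lists2dict2_spec : Claim_equal_lists2dict2 := by
  intro keys values _
  unfold Spec_lists2dict2 lists2dict2 lists2dict2_alt
  set x : Nat := min keys.length values.length with hx
  have hxi : (if (keys.length : Int) > (values.length : Int) then (values.length : Int) else (keys.length : Int)) = (x : Int) := by
    simp only [hx]; split_ifs with h <;> [skip; skip] <;> omega
  rw [hxi]
  have h0 : ((0 : Nat) : Int) = (0 : Int) := rfl
  rw [← h0, loop_eq_pairLoop keys values x (by omega) (by omega) 0 PySem.Dict.empty (by omega)]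
  simp only [List.drop_zero, Nat.sub_zero]
  have hzip : keys.zip values = (keys.take x).zip (values.take x) := List.zip_eq_zip_take_min
  have hlen : (keys.zip values).length = x := by rw [List.length_zip]
  have htake : (keys.zip values).take x = keys.zip values := List.take_of_length_le (by omega)
  rw [htake, pairLoop_characterization _ PySem.Dict.empty (by simp [PySem.Dict.keys_empty])]
  have hiff := set_check_iff (keys.take x)
  have hfst : (keys.zip values).map Prod.fst = keys.take x := by
    rw [hzip, List.map_fst_zip (by simp [hx])]
  have hlen_take : (keys.take x).length = x := by simp [hx]
  by_cases hnd : (keys.take x).Nodup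
  · rw [if_pos (by rw [hfst]; exact ⟨hnd, fun k _ => by simp [PySem.Dict.contains_empty]⟩)]
    rw [if_neg (by rw [hlen_take] at hiff; rw [hiff]; simpa using hnd)]
    rw [dict_ofList_items_of_nodup _ (by rw [hfst]; exact hnd)]
    simp [show (PySem.Dict.empty : PySem.Dict String String).items = [] from rfl]
  · rw [if_neg (by rintro ⟨h1, -⟩; rw [hfst] at h1; exact hnd h1)]
    rw [if_pos (by rw [hlen_take] at hiff; rw [hiff]; simpa using hnd)]
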